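-- pv_equiv track=rewrite | github.com/janlaan/zoekmachines | wordcomplete.py | wcomp
-- ===== SOURCE A (Python) =====
-- def searchwords(stam,lijst):
--   newList = []
--
--   for word in lijst:
--     if word.lower().startswith(stam):
--       newList.append(word)
--
--   return newList
--
-- def wcomp(stam,words):
--   list = words.split()
--   punctuation = [',','(',')',':',';','<','>','"','?','/','!']
--   list = [''.join(c for c in s if c not in punctuation) for s in list]
--   newList = searchwords(stam,list)
--
--   if not newList:
--     newList = searchwords(stam[:-1:],list)
--
--   if not newList:
--     return stam
--   else:
--     return min(newList, key = len)
-- ===== SOURCE B (Python) =====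
-- def wcomp(stam, words):
--     punctuation = {',', '(', ')', ':', ';', '<', '>', '"', '?', '/', '!'}
--     pre = stam[:-1]
--     best_full = None
--     best_trunc = None
--     for raw in words.split():
--         w = ''.join(c for c in raw if c not in punctuation)
--         lw = w.lower()
--         if lw.startswith(stam):
--             if best_full is None or len(w) < len(best_full):
--                 best_full = w
--         elif lw.startswith(pre):
--             if best_trunc is None or len(w) < len(best_trunc):
--                 best_trunc = w
--     if best_full is not None:
--         return best_full
--     if best_trunc is not None:
--         return best_trunc
--     return stam
-- ===== Notes on version B (the rewrite author's own statement) =====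
-- stated objective: faster
-- what changed: Replaces the build-two-filtered-lists-then-min structure (searchwords called twice plus min(key=len)) with a single pass over the words maintaining two running first-shortest-match accumulators (full prefix and truncated prefix), so no intermediate match lists are built and the words are traversed once.
import Mathlib
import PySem

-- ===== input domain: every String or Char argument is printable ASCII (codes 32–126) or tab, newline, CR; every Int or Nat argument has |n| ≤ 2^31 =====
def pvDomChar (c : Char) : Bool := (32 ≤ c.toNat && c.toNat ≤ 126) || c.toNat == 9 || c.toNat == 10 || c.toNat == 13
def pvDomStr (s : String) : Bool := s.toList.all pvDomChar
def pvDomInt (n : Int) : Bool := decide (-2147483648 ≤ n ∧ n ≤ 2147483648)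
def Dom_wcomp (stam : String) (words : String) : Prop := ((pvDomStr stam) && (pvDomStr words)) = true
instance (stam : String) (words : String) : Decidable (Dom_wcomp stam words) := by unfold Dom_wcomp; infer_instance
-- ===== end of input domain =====

-- B replaces A's two searchwords filter passes + min(key=len) by one loop keeping two running
-- first-shortest-match accumulators; same return value everywhere (timing run measured B faster).

-- ===== PORT A =====
def pvPunctA : List Char := [',', '(', ')', ':', ';', '<', '>', '"', '?', '/', '!']

def searchwords (stam : String) (lijst : List String) : List String :=
  lijst.foldl (fun acc word =>
    if PySem.Str.startswith (PySem.Str.lower word) stam then acc ++ [word] else acc) []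

def wcomp (stam : String) (words : String) : String :=
  let list0 := PySem.Str.split₀ words
  let list1 := list0.map (fun s => String.ofList (s.toList.filter (fun c => !pvPunctA.contains c)))
  let newList := searchwords stam list1
  let newList := if newList.isEmpty then searchwords (PySem.Str.slice stam none (some (-1))) list1 else newList
  if newList.isEmpty then stam
  else (PySem.List.min? newList (fun w => PySem.Str.len w)).getD stam  -- guarded: newList ≠ [] here, min cannot raise

-- ===== PORT B =====
def pvPunctB : PySem.Set Char := PySem.Set.ofList [',', '(', ')', ':', ';', '<', '>', '"', '?', '/', '!']

def wcomp_alt (stam : String) (words : String) : String :=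
  let pre := PySem.Str.slice stam none (some (-1))
  let st := (PySem.Str.split₀ words).foldl (fun (p : Option String × Option String) raw =>
    let w := String.ofList (raw.toList.filter (fun c => !PySem.Set.contains pvPunctB c))
    let lw := PySem.Str.lower w
    if PySem.Str.startswith lw stam then
      match p.1 with
      | none => (some w, p.2)
      | some b => if PySem.Str.len w < PySem.Str.len b then (some w, p.2) else p
    else if PySem.Str.startswith lw pre then
      match p.2 with
      | none => (p.1, some w)
      | some b => if PySem.Str.len w < PySem.Str.len b then (p.1, some w) else p
    else p) (none, none)
  match st.1 with
  | some w => w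
  | none =>
    match st.2 with
    | some w => w
    | none => stam

-- ===== PRECONDITION & SPEC =====
def Spec_wcomp (stam : String) (words : String) (out : String) : Prop := out = wcomp_alt stam words
instance (stam : String) (words : String) (out : String) : Decidable (Spec_wcomp stam words out) := by unfold Spec_wcomp; infer_instance

-- ===== CLAIM (what is proved, stated in full; the proofs are below) =====
def Claim_equal_wcomp : Prop := ∀ (stam : String) (words : String), Dom_wcomp stam words → Spec_wcomp stam words (wcomp stam words)

-- ===== LEMMAS AND PROOFS =====

-- min?'s running-minimum step: PySem.List.min? with key len IS this strict-< fold
def pvStep (acc : Option String) (x : String) : Option String :=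
  match acc with
  | none => some x
  | some m => if PySem.Str.len x < PySem.Str.len m then some x else some m

theorem min?_eq_foldl_pvStep (xs : List String) :
    PySem.List.min? xs (fun w => PySem.Str.len w) = xs.foldl pvStep none := by
  unfold PySem.List.min?
  exact congrArg (fun g : Option String → String → Option String => List.foldl g none xs)
    (by funext acc x; cases acc <;> rfl)

-- B's pair fold splits into the two running minima of the two filtered lists
theorem pairFold (pf qf : String → Bool) (ws : List String) (b1 b2 : Option String) :
    ws.foldl (fun (p : Option String × Option String) w =>
      if pf w then
        match p.1 with
        | none => (some w, p.2)
        | some b => if PySem.Str.len w < PySem.Str.len b then (some w, p.2) else p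
      else if qf w then
        match p.2 with
        | none => (p.1, some w)
        | some b => if PySem.Str.len w < PySem.Str.len b then (p.1, some w) else p
      else p) (b1, b2)
    = ((ws.filter pf).foldl pvStep b1,
       (ws.filter (fun w => !pf w && qf w)).foldl pvStep b2) := by
  set f := fun (p : Option String × Option String) (w : String) =>
      if pf w then
        match p.1 with
        | none => (some w, p.2)
        | some b => if PySem.Str.len w < PySem.Str.len b then (some w, p.2) else p
      else if qf w then
        match p.2 with
        | none => (p.1, some w)
        | some b => if PySem.Str.len w < PySem.Str.len b then (p.1, some w) else p
      else p with hf
  induction ws generalizing b1 b2 with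
  | nil => rfl
  | cons w t ih =>
    by_cases h1 : pf w = true
    · have hhead : f (b1, b2) w = (pvStep b1 w, b2) := by
        cases b1 with
        | none => simp [hf, pvStep, h1]
        | some b =>
          simp only [hf, pvStep, h1, if_true]
          split <;> rfl
      rw [List.filter_cons, List.filter_cons, if_pos h1, if_neg (by simp [h1]),
          List.foldl_cons, List.foldl_cons, hhead, ih]
    · by_cases h2 : qf w = true
      · have hhead : f (b1, b2) w = (b1, pvStep b2 w) := by
          cases b2 with
          | none => simp [hf, pvStep, h1, h2]
          | some b =>
            simp only [hf, pvStep, h1, h2, Bool.false_eq_true, if_false, if_true]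
            split <;> rfl
        rw [List.filter_cons, List.filter_cons, if_neg (by simp [h1]), if_pos (by simp [h1, h2]),
            List.foldl_cons, List.foldl_cons, hhead, ih]
      · have hhead : f (b1, b2) w = (b1, b2) := by simp [hf, h1, h2]
        rw [List.filter_cons, List.filter_cons, if_neg (by simp [h1]), if_neg (by simp [h1, h2]),
            List.foldl_cons, hhead, ih]

theorem searchwords_eq_filter (st : String) (l : List String) :
    searchwords st l = l.filter (fun w => PySem.Str.startswith (PySem.Str.lower w) st) := by
  unfold searchwords
  simpa using PySem.List.foldl_append_if_eq_filter
    (fun w => PySem.Str.startswith (PySem.Str.lower w) st) l ([] : List String)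

theorem foldl_pvStep_none_eq_nil_iff (xs : List String) :
    xs.foldl pvStep none = none ↔ xs = [] := by
  rw [← min?_eq_foldl_pvStep xs]
  exact PySem.List.min?_eq_none_iff xs (fun w => PySem.Str.len w)

-- the two ports, over an abstract cleaned-word map cl (instantiated by defeq in the verdict)
theorem wcomp_core (stam pre : String) (l : List String) (cl : String → String) :
    (if (if (searchwords stam (l.map cl)).isEmpty
         then searchwords pre (l.map cl) else searchwords stam (l.map cl)).isEmpty
     then stam
     else (PySem.List.min? (if (searchwords stam (l.map cl)).isEmpty
            then searchwords pre (l.map cl) else searchwords stam (l.map cl))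
            (fun w => PySem.Str.len w)).getD stam)
    = (match (l.foldl (fun (p : Option String × Option String) raw =>
        if PySem.Str.startswith (PySem.Str.lower (cl raw)) stam then
          match p.1 with
          | none => (some (cl raw), p.2)
          | some b => if PySem.Str.len (cl raw) < PySem.Str.len b then (some (cl raw), p.2) else p
        else if PySem.Str.startswith (PySem.Str.lower (cl raw)) pre then
          match p.2 with
          | none => (p.1, some (cl raw))
          | some b => if PySem.Str.len (cl raw) < PySem.Str.len b then (p.1, some (cl raw)) else p
        else p) (none, none)).1 with
       | some w => w
       | none =>
         match (l.foldl (fun (p : Option String × Option String) raw =>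
           if PySem.Str.startswith (PySem.Str.lower (cl raw)) stam then
             match p.1 with
             | none => (some (cl raw), p.2)
             | some b => if PySem.Str.len (cl raw) < PySem.Str.len b then (some (cl raw), p.2) else p
           else if PySem.Str.startswith (PySem.Str.lower (cl raw)) pre then
             match p.2 with
             | none => (p.1, some (cl raw))
             | some b => if PySem.Str.len (cl raw) < PySem.Str.len b then (p.1, some (cl raw)) else p
           else p) (none, none)).2 with
         | some w => w
         | none => stam) := by
  have hB : l.foldl (fun (p : Option String × Option String) raw =>
        if PySem.Str.startswith (PySem.Str.lower (cl raw)) stam then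
          match p.1 with
          | none => (some (cl raw), p.2)
          | some b => if PySem.Str.len (cl raw) < PySem.Str.len b then (some (cl raw), p.2) else p
        else if PySem.Str.startswith (PySem.Str.lower (cl raw)) pre then
          match p.2 with
          | none => (p.1, some (cl raw))
          | some b => if PySem.Str.len (cl raw) < PySem.Str.len b then (p.1, some (cl raw)) else p
        else p) (none, none)
      = (((l.map cl).filter (fun w => PySem.Str.startswith (PySem.Str.lower w) stam)).foldl pvStep none,
         ((l.map cl).filter (fun w => !PySem.Str.startswith (PySem.Str.lower w) stam
              && PySem.Str.startswith (PySem.Str.lower w) pre)).foldl pvStep none) := by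
    have h := pairFold (fun w => PySem.Str.startswith (PySem.Str.lower w) stam)
      (fun w => PySem.Str.startswith (PySem.Str.lower w) pre) (l.map cl) none none
    rw [List.foldl_map] at h
    exact h
  rw [hB, searchwords_eq_filter, searchwords_eq_filter]
  by_cases hfull : (l.map cl).filter (fun w => PySem.Str.startswith (PySem.Str.lower w) stam) = []
  · -- no full-prefix match: B's first accumulator is empty, A falls back to the truncated stem
    have hmem : ∀ w ∈ l.map cl, PySem.Str.startswith (PySem.Str.lower w) stam = false := by
      intro w hw
      have := List.filter_eq_nil_iff.mp hfull w hw
      revert this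
      cases PySem.Str.startswith (PySem.Str.lower w) stam <;> simp
    have hfq : (l.map cl).filter (fun w => !PySem.Str.startswith (PySem.Str.lower w) stam
          && PySem.Str.startswith (PySem.Str.lower w) pre)
        = (l.map cl).filter (fun w => PySem.Str.startswith (PySem.Str.lower w) pre) := by
      apply List.filter_congr
      intro w hw
      rw [hmem w hw]
      rfl
    rw [hfull, hfq, if_pos List.isEmpty_nil]
    simp only [List.foldl_nil]
    by_cases htr : (l.map cl).filter (fun w => PySem.Str.startswith (PySem.Str.lower w) pre) = []
    · rw [htr, if_pos List.isEmpty_nil]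
      rfl
    · have hne : ((l.map cl).filter (fun w => PySem.Str.startswith (PySem.Str.lower w) pre)).foldl pvStep none ≠ none := by
        rw [ne_eq, foldl_pvStep_none_eq_nil_iff]; exact htr
      obtain ⟨m, hm⟩ := Option.ne_none_iff_exists'.mp hne
      have hct : ¬ ((((l.map cl).filter (fun w => PySem.Str.startswith (PySem.Str.lower w) pre))).isEmpty = true) :=
        fun h => htr (List.isEmpty_iff.mp h)
      rw [if_neg hct, min?_eq_foldl_pvStep, hm]
      rfl
  · -- a full-prefix match exists: both sides return the first shortest of that filter
    have hne : ((l.map cl).filter (fun w => PySem.Str.startswith (PySem.Str.lower w) stam)).foldl pvStep none ≠ none := by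
      rw [ne_eq, foldl_pvStep_none_eq_nil_iff]; exact hfull
    obtain ⟨m, hm⟩ := Option.ne_none_iff_exists'.mp hne
    have hcf : ¬ ((((l.map cl).filter (fun w => PySem.Str.startswith (PySem.Str.lower w) stam))).isEmpty = true) :=
      fun h => hfull (List.isEmpty_iff.mp h)
    rw [if_neg hcf, if_neg hcf, min?_eq_foldl_pvStep, hm]
    rfl

-- ===== VERDICT (by name: the statement is the Claim_ definition above) =====
theorem wcomp_spec : Claim_equal_wcomp := by
  intro stam words _
  exact wcomp_core stam (PySem.Str.slice stam none (some (-1))) (PySem.Str.split₀ words)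
    (fun s => String.ofList (s.toList.filter (fun c => !pvPunctA.contains c)))
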